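-- pv_equiv track=rewrite | github.com/saurabh7521/PODEM-Based-ATPG | podem_atpg.py | _eval_3val
-- ===== SOURCE A (Python) =====
-- from typing import Dict, List, Tuple, Set, Optional
--
-- def _eval_3val(gtype: str, ins: List[Optional[int]]) -> Optional[int]:
--     """
--     3-valued gate evaluation with values in {0,1,None} (None = X).
--     This is used separately for the good and faulty circuits.
--     """
--     g = gtype.upper()
--
--     def all_known(vals: List[Optional[int]]) -> bool:
--         for v in vals:
--             if v is None:
--                 return False
--         return True
--
--     if g in ("BUF", "WIRE"):
--         return ins[0]
--
--     if g in ("INV", "NOT"):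
--         v = ins[0]
--         if v is None:
--             return None
--         return 0 if v == 1 else 1
--
--     if g == "AND":
--         if any(v == 0 for v in ins):
--             return 0
--         if all_known(ins) and all(v == 1 for v in ins):
--             return 1
--         return None
--
--     if g == "NAND":
--         # NAND = NOT(AND)
--         base = _eval_3val("AND", ins)
--         if base is None:
--             return None
--         return 0 if base == 1 else 1
--
--     if g == "OR":
--         if any(v == 1 for v in ins):
--             return 1
--         if all_known(ins) and all(v == 0 for v in ins):
--             return 0
--         return None
--
--     if g == "NOR":
--         base = _eval_3val("OR", ins)
--         if base is None:
--             return None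
--         return 0 if base == 1 else 1
--
--     if g == "XOR":
--         # XOR: parity of 1s; if any X, output is X
--         if any(v is None for v in ins):
--             return None
--         return sum(1 for v in ins if v == 1) % 2
--
--     if g == "XNOR":
--         base = _eval_3val("XOR", ins)
--         if base is None:
--             return None
--         return 0 if base == 1 else 1
--
--     raise ValueError(f"Unknown gate type: {gtype}")
-- ===== SOURCE B (Python) =====
-- from typing import List, Optional
--
-- def _eval_3val(gtype: str, ins: List[Optional[int]]) -> Optional[int]:
--     g = gtype.upper()
--     if g in ("BUF", "WIRE"):
--         return ins[0]
--     if g in ("INV", "NOT"):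
--         v = ins[0]
--         return None if v is None else (0 if v == 1 else 1)
--     zeros = ones = nones = 0
--     for v in ins:
--         if v is None:
--             nones += 1
--         elif v == 0:
--             zeros += 1
--         elif v == 1:
--             ones += 1
--     n = len(ins)
--     if g in ("AND", "NAND"):
--         base = 0 if zeros else (1 if ones == n else None)
--     elif g in ("OR", "NOR"):
--         base = 1 if ones else (0 if zeros == n else None)
--     elif g in ("XOR", "XNOR"):
--         base = None if nones else ones % 2
--     else:
--         raise ValueError(f"Unknown gate type: {gtype}")
--     if g in ("NAND", "NOR", "XNOR") and base is not None:
--         base = 1 - base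
--     return base
-- ===== Notes on version B (the rewrite author's own statement) =====
-- stated objective: alternative
-- what changed: Replaces A's recursive self-calls for NAND/NOR/XNOR and its per-gate any/all scans by a single counting pass (zeros/ones/nones) from which a generic base value is computed and a single inversion flag is applied for the N-variants.
import Mathlib
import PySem

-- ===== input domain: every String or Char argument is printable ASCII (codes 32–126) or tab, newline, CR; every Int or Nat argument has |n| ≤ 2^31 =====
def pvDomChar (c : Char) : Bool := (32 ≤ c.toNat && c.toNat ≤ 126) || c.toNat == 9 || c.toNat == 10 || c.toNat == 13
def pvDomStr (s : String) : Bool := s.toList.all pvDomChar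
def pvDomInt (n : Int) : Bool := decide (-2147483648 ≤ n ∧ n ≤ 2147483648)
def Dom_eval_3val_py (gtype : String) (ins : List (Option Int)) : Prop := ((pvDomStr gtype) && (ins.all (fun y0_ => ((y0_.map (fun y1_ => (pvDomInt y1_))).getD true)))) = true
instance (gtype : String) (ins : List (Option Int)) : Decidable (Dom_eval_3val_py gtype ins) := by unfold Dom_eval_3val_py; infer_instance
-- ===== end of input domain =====

-- B replaces A's recursive self-calls and per-gate any/all scans by one counting pass plus a single
-- inversion step for NAND/NOR/XNOR (objective: alternative decomposition, same asymptotic cost).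

-- ===== PORT A =====
-- helper all_known of A (explicit loop with early return False)
def pvAllKnown : List (Option Int) → Bool
  | [] => true
  | v :: rest => match v with
    | none => false
    | some _ => pvAllKnown rest

def eval_3val_py (gtype : String) (ins : List (Option Int)) : Option Int :=
  if PySem.Str.upper gtype = "BUF" ∨ PySem.Str.upper gtype = "WIRE" then
    -- ins[0]: IndexError on empty list is excluded by Pre_
    match PySem.List.pyGet? ins 0 with
    | some v => v
    | none => none
  else if PySem.Str.upper gtype = "INV" ∨ PySem.Str.upper gtype = "NOT" then
    match PySem.List.pyGet? ins 0 with
    | some v =>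
      match v with
      | none => none
      | some x => if x = 1 then some 0 else some 1
    | none => none
  else if PySem.Str.upper gtype = "AND" then
    if ins.any (fun v => v == some 0) then some 0
    else if pvAllKnown ins && ins.all (fun v => v == some 1) then some 1
    else none
  else if h : PySem.Str.upper gtype = "NAND" then
    match eval_3val_py "AND" ins with
    | none => none
    | some b => if b = 1 then some 0 else some 1
  else if PySem.Str.upper gtype = "OR" then
    if ins.any (fun v => v == some 1) then some 1
    else if pvAllKnown ins && ins.all (fun v => v == some 0) then some 0
    else none
  else if h : PySem.Str.upper gtype = "NOR" then
    match eval_3val_py "OR" ins with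
    | none => none
    | some b => if b = 1 then some 0 else some 1
  else if PySem.Str.upper gtype = "XOR" then
    if ins.any (fun v => v == none) then none
    else some (PySem.Int.mod (ins.foldl (fun s v => if v == some 1 then s + 1 else s) (0 : Int)) 2)
  else if h : PySem.Str.upper gtype = "XNOR" then
    match eval_3val_py "XOR" ins with
    | none => none
    | some b => if b = 1 then some 0 else some 1
  else
    none  -- raise ValueError: excluded by Pre_
termination_by (if PySem.Str.upper gtype ∈ (["NAND", "NOR", "XNOR"] : List String) then 1 else 0 : Nat)
decreasing_by
  · simp [h]; decide
  · simp [h]; decide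
  · simp [h]; decide

-- ===== PORT B =====
def eval_3val_py_alt (gtype : String) (ins : List (Option Int)) : Option Int :=
  let g := PySem.Str.upper gtype
  if g = "BUF" ∨ g = "WIRE" then
    match PySem.List.pyGet? ins 0 with
    | some v => v
    | none => none
  else if g = "INV" ∨ g = "NOT" then
    match PySem.List.pyGet? ins 0 with
    | some v =>
      match v with
      | none => none
      | some x => if x = 1 then some 0 else some 1
    | none => none
  else
    -- one counting pass: (zeros, ones, nones)
    let c := ins.foldl (fun (acc : Int × Int × Int) v =>
      match v with
      | none => (acc.1, acc.2.1, acc.2.2 + 1)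
      | some x =>
        if x = 0 then (acc.1 + 1, acc.2.1, acc.2.2)
        else if x = 1 then (acc.1, acc.2.1 + 1, acc.2.2)
        else acc) ((0, 0, 0) : Int × Int × Int)
    let n : Int := ins.length
    let base : Option Int :=
      if g = "AND" ∨ g = "NAND" then
        (if c.1 ≠ 0 then some 0 else if c.2.1 = n then some 1 else none)
      else if g = "OR" ∨ g = "NOR" then
        (if c.2.1 ≠ 0 then some 1 else if c.1 = n then some 0 else none)
      else if g = "XOR" ∨ g = "XNOR" then
        (if c.2.2 ≠ 0 then none else some (PySem.Int.mod c.2.1 2))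
      else none  -- raise ValueError: excluded by Pre_
    if g = "NAND" ∨ g = "NOR" ∨ g = "XNOR" then
      match base with
      | none => none
      | some b => some (1 - b)
    else base

-- ===== PRECONDITION & SPEC =====
-- Pre_ excludes exactly the inputs on which A raises: an unknown gate type (ValueError) and
-- BUF/WIRE/INV/NOT applied to an empty input list (IndexError from ins[0]).
def Pre_eval_3val_py (gtype : String) (ins : List (Option Int)) : Prop :=
  PySem.Str.upper gtype ∈ (["BUF", "WIRE", "INV", "NOT", "AND", "NAND", "OR", "NOR", "XOR", "XNOR"] : List String) ∧
  (PySem.Str.upper gtype ∈ (["BUF", "WIRE", "INV", "NOT"] : List String) → ins ≠ [])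
instance (gtype : String) (ins : List (Option Int)) : Decidable (Pre_eval_3val_py gtype ins) := by
  unfold Pre_eval_3val_py; infer_instance

def pvWitness_eval_3val_py : String × List (Option Int) := ("NAND", [some 1, none])

def Spec_eval_3val_py (gtype : String) (ins : List (Option Int)) (out : Option Int) : Prop := out = eval_3val_py_alt gtype ins
instance (gtype : String) (ins : List (Option Int)) (out : Option Int) : Decidable (Spec_eval_3val_py gtype ins out) := by unfold Spec_eval_3val_py; infer_instance

-- ===== CLAIM (what is proved, stated in full; the proofs are below) =====
def Claim_equal_eval_3val_py : Prop := ∀ (gtype : String) (ins : List (Option Int)), Dom_eval_3val_py gtype ins → Pre_eval_3val_py gtype ins → Spec_eval_3val_py gtype ins (eval_3val_py gtype ins)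

theorem foldB (ins : List (Option Int)) (z o x : Int) :
    ins.foldl (fun (acc : Int × Int × Int) v =>
      match v with
      | none => (acc.1, acc.2.1, acc.2.2 + 1)
      | some y =>
        if y = 0 then (acc.1 + 1, acc.2.1, acc.2.2)
        else if y = 1 then (acc.1, acc.2.1 + 1, acc.2.2)
        else acc) (z, o, x)
    = (z + ins.countP (fun v => v == some 0), o + ins.countP (fun v => v == some 1),
       x + ins.countP (fun v => v == none)) := by
  induction ins generalizing z o x with
  | nil => simp
  | cons v rest ih =>
    match v with
    | none => simp [ih]; ring_nf
    | some y =>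
      by_cases h0 : y = 0
      · simp [h0, ih]; ring_nf
      · by_cases h1 : y = 1
        · simp [h0, h1, ih]; ring_nf
        · simp [h0, h1, ih]

theorem any_eq_countP (ins : List (Option Int)) (p : Option Int → Bool) :
    ins.any p = decide (0 < ins.countP p) := by
  rcases h : ins.any p with _ | _
  · simp only [List.any_eq_false] at h
    simp [List.countP_eq_zero.mpr h]
  · simp only [List.any_eq_true] at h
    have : 0 < ins.countP p := List.countP_pos_iff.mpr h
    simp [this]

theorem allknown_of_all_one (ins : List (Option Int)) (k : Int) (h : ins.all (fun v => v == some k) = true) :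
    pvAllKnown ins = true := by
  induction ins with
  | nil => rfl
  | cons v rest ih =>
    simp only [List.all_cons, Bool.and_eq_true] at h
    cases v with
    | none => simp at h
    | some y => exact ih h.2

theorem all_one_countP (ins : List (Option Int)) (k : Int) :
    (pvAllKnown ins && ins.all (fun v => v == some k)) = decide ((ins.countP (fun v => v == some k) : Int) = (ins.length : Int)) := by
  by_cases h : ins.all (fun v => v == some k) = true
  · have := List.countP_eq_length.mpr (List.all_eq_true.mp h)
    simp [h, allknown_of_all_one ins k h, this]
  · simp only [Bool.not_eq_true] at h
    have hne : ins.countP (fun v => v == some k) ≠ ins.length := by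
      intro hc
      exact absurd (List.all_eq_true.mpr (List.countP_eq_length.mp hc)) (by simp [h])
    simp [h, hne]
    try omega

theorem sumfold_eq_countP (ins : List (Option Int)) (s : Int) :
    ins.foldl (fun s v => if v == some 1 then s + 1 else s) s = s + ins.countP (fun v => v == some 1) := by
  induction ins generalizing s with
  | nil => simp
  | cons v rest ih =>
    cases v with
    | none =>
      rw [List.foldl_cons, if_neg (by simp), ih, List.countP_cons]
      simp
    | some y =>
      by_cases h : y = 1
      · rw [List.foldl_cons, if_pos (by simp [h]), ih, List.countP_cons]
        simp [h]
        ring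
      · rw [List.foldl_cons, if_neg (by simp [h]), ih, List.countP_cons]
        simp [h]

theorem evalA_AND (ins : List (Option Int)) :
    eval_3val_py "AND" ins =
      (if 0 < ins.countP (fun v => v == some 0) then some 0
       else if (ins.countP (fun v => v == some 1) : Int) = (ins.length : Int) then some 1 else none) := by
  have hu : PySem.Str.upper "AND" = "AND" := rfl
  rw [eval_3val_py.eq_def]
  simp only [hu, String.reduceEq, reduceIte, or_self, false_or, or_false, reduceDIte]
  rw [any_eq_countP, all_one_countP]
  simp

theorem evalA_OR (ins : List (Option Int)) :
    eval_3val_py "OR" ins =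
      (if 0 < ins.countP (fun v => v == some 1) then some 1
       else if (ins.countP (fun v => v == some 0) : Int) = (ins.length : Int) then some 0 else none) := by
  have hu : PySem.Str.upper "OR" = "OR" := rfl
  rw [eval_3val_py.eq_def]
  simp only [hu, String.reduceEq, reduceIte, or_self, false_or, or_false, reduceDIte]
  rw [any_eq_countP, all_one_countP]
  simp

theorem evalA_XOR (ins : List (Option Int)) :
    eval_3val_py "XOR" ins =
      (if 0 < ins.countP (fun v => v == none) then none
       else some (PySem.Int.mod (ins.countP (fun v => v == some 1) : Int) 2)) := by
  have hu : PySem.Str.upper "XOR" = "XOR" := rfl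
  rw [eval_3val_py.eq_def]
  simp only [hu, String.reduceEq, reduceIte, or_self, false_or, or_false, reduceDIte]
  rw [any_eq_countP, sumfold_eq_countP]
  simp

-- ===== VERDICT (by name: the statement is the Claim_ definition above) =====
theorem eval_3val_py_spec : Claim_equal_eval_3val_py := by
  intro gtype ins _ hpre
  obtain ⟨hg, _hne⟩ := hpre
  unfold Spec_eval_3val_py
  simp only [List.mem_cons, List.not_mem_nil, or_false] at hg
  rcases hg with h|h|h|h|h|h|h|h|h|h
  · rw [eval_3val_py.eq_def]; simp [eval_3val_py_alt, h]
  · rw [eval_3val_py.eq_def]; simp [eval_3val_py_alt, h]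
  · rw [eval_3val_py.eq_def]; simp [eval_3val_py_alt, h]
  · rw [eval_3val_py.eq_def]; simp [eval_3val_py_alt, h]
  · -- AND
    rw [eval_3val_py.eq_def]
    simp only [eval_3val_py_alt, h, String.reduceEq, reduceIte, or_self, or_false, false_or, reduceDIte]
    rw [foldB, any_eq_countP, all_one_countP]
    simp only [zero_add, decide_eq_true_eq]
    split_ifs <;> first | rfl | omega
  · -- NAND
    rw [eval_3val_py.eq_def]
    simp only [eval_3val_py_alt, h, String.reduceEq, reduceIte, or_self, or_true, true_or, false_or, or_false, reduceDIte]
    rw [evalA_AND, foldB]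
    simp only [zero_add]
    split_ifs <;> simp_all
  · -- OR
    rw [eval_3val_py.eq_def]
    simp only [eval_3val_py_alt, h, String.reduceEq, reduceIte, or_self, or_false, false_or, reduceDIte]
    rw [foldB, any_eq_countP, all_one_countP]
    simp only [zero_add, decide_eq_true_eq]
    split_ifs <;> first | rfl | omega
  · -- NOR
    rw [eval_3val_py.eq_def]
    simp only [eval_3val_py_alt, h, String.reduceEq, reduceIte, or_self, or_true, true_or, false_or, or_false, reduceDIte]
    rw [evalA_OR, foldB]
    simp only [zero_add]
    split_ifs <;> simp_all
  · -- XOR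
    rw [eval_3val_py.eq_def]
    simp only [eval_3val_py_alt, h, String.reduceEq, reduceIte, or_self, or_false, false_or, reduceDIte]
    rw [foldB, any_eq_countP, sumfold_eq_countP]
    simp only [zero_add, decide_eq_true_eq]
    split_ifs <;> first | rfl | omega
  · -- XNOR
    rw [eval_3val_py.eq_def]
    simp only [eval_3val_py_alt, h, String.reduceEq, reduceIte, or_self, or_true, true_or, false_or, or_false, reduceDIte]
    rw [evalA_XOR, foldB]
    simp only [zero_add]
    split_ifs <;> simp_all
    rcases Int.emod_two_eq_zero_or_one ((ins.countP (fun v => v == some 1) : Int)) with hm | hm <;>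
      rw [hm] <;> norm_num
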